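-- pv_equiv track=rewrite | github.com/nathandarmon21/Old-Sanctuary-Remote-Access | scripts/analyze_tier5_pilot.py | production_outcome
-- ===== SOURCE A (Python) =====
-- def production_outcome(events: list[dict]) -> dict:
--     """Production summary per seller: planned vs defective Poor."""
--     out = {}
--     for e in events:
--         if e["event_type"] == "production":
--             s = e.get("seller")
--             out.setdefault(s, {"events": 0, "excellent": 0, "poor_planned": 0, "defects": 0})
--             out[s]["events"] += 1
--             out[s]["excellent"] += int(e.get("excellent", 0))
--             # Poor field includes defects in current schema; subtract defects to get planned Poor
--             poor_total = int(e.get("poor", 0))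
--             defects = int(e.get("defects", 0) or 0)
--             out[s]["poor_planned"] += max(0, poor_total - defects)
--             out[s]["defects"] += defects
--     return out
-- ===== SOURCE B (Python) =====
-- def production_outcome(events: list[dict]) -> dict:
--     """Production summary per seller: planned vs defective Poor."""
--     groups = {}
--     for e in events:
--         if e["event_type"] == "production":
--             groups.setdefault(e.get("seller"), []).append(e)
--     out = {}
--     for s, evs in groups.items():
--         n = ex = pp = df = 0
--         for e in evs:
--             n += 1
--             ex += int(e.get("excellent", 0))
--             d = int(e.get("defects", 0) or 0)
--             pp += max(0, int(e.get("poor", 0)) - d)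
--             df += d
--         out[s] = {"events": n, "excellent": ex, "poor_planned": pp, "defects": df}
--     return out
-- ===== Notes on version B (the rewrite author's own statement) =====
-- stated objective: alternative
-- what changed: Replaces A's fused single pass that mutates per-seller counters in one dict with a two-phase decomposition: first partition production events into a seller->events grouping dict (first-occurrence order), then reduce each group to its summary.
import Mathlib
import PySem

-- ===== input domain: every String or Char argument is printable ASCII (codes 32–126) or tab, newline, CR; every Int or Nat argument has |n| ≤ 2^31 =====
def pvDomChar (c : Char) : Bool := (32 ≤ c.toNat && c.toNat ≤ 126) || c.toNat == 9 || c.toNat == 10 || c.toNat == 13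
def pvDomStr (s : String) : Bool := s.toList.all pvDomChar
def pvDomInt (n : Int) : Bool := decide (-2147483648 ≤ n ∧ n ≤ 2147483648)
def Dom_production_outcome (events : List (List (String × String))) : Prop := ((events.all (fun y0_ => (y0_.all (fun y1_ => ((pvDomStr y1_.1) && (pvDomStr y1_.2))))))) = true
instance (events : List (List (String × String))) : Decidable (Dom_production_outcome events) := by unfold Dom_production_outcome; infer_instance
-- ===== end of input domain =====

-- B replaces A's fused single pass (one dict of mutable per-seller counters) with a two-phase
-- decomposition: partition production events into a seller→events grouping dict, then reduce each
-- group to its summary; same cost, proved to return the same value on Pre_.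

-- ===== PORT A =====
-- shared accessors for the Python expressions both versions evaluate:
-- e.get(k) on the event dict (first match in the association list)
def pvGetA (e : List (String × String)) (k : String) : Option String :=
  (PySem.Dict.mk e).get? k
-- int(x) for x = e.get(k, 0): missing key → 0; '' → 0 (matches `or 0`); Python raises on other
-- non-int strings — those inputs are outside Pre_, the port returns 0 there.
def pvIntA (o : Option String) : Int :=
  match o with
  | none => 0
  | some s => (PySem.Int.ofStr? s).getD 0
-- e["event_type"] == "production" (missing "event_type" raises in Python: outside Pre_)
def pvIsProdA (e : List (String × String)) : Bool :=
  pvGetA e "event_type" == some "production"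
-- s = e.get("seller"); a missing "seller" gives the None key in Python: outside Pre_
def pvSellerA (e : List (String × String)) : String :=
  (pvGetA e "seller").getD ""
def pvInitA : PySem.Dict String Int :=
  PySem.Dict.ofList [("events", 0), ("excellent", 0), ("poor_planned", 0), ("defects", 0)]
-- the four `out[s][k] += v` updates of A's loop body
def pvUpdA (e : List (String × String)) (d : PySem.Dict String Int) : PySem.Dict String Int :=
  let exc := pvIntA (pvGetA e "excellent")
  let poor := pvIntA (pvGetA e "poor")
  let df := pvIntA (pvGetA e "defects")
  (((d.modify "events" 0 (· + 1)).modify "excellent" 0 (· + exc)).modify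
      "poor_planned" 0 (· + max 0 (poor - df))).modify "defects" 0 (· + df)
def pvStepA (out : PySem.Dict String (PySem.Dict String Int)) (e : List (String × String)) :
    PySem.Dict String (PySem.Dict String Int) :=
  if pvIsProdA e then
    let s := pvSellerA e
    (out.setdefault s pvInitA).modify s pvInitA (pvUpdA e)
  else out
def production_outcome (events : List (List (String × String))) :
    List (String × List (String × Int)) :=
  ((events.foldl pvStepA PySem.Dict.empty).items).map (fun p => (p.1, p.2.items))

-- ===== PORT B =====
-- groups.setdefault(s, []).append(e)  ≡  groups[s] = groups.get(s, []) + [e] (exact)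
def pvStepB (g : PySem.Dict String (List (List (String × String))))
    (e : List (String × String)) : PySem.Dict String (List (List (String × String))) :=
  if pvIsProdA e then g.modify (pvSellerA e) [] (· ++ [e]) else g
-- the per-event accumulation (n, ex, pp, df) of B's reduce loop
def pvTupStepB (t : Int × Int × Int × Int) (e : List (String × String)) :
    Int × Int × Int × Int :=
  let d := pvIntA (pvGetA e "defects")
  (t.1 + 1, t.2.1 + pvIntA (pvGetA e "excellent"),
   t.2.2.1 + max 0 (pvIntA (pvGetA e "poor") - d), t.2.2.2 + d)
def pvSummB (l : List (List (String × String))) : List (String × Int) :=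
  let t := l.foldl pvTupStepB ((0 : Int), (0 : Int), (0 : Int), (0 : Int))
  [("events", t.1), ("excellent", t.2.1), ("poor_planned", t.2.2.1), ("defects", t.2.2.2)]
def production_outcome_alt (events : List (List (String × String))) :
    List (String × List (String × Int)) :=
  ((events.foldl pvStepB PySem.Dict.empty).items).map (fun p => (p.1, pvSummB p.2))

-- ===== PRECONDITION & SPEC =====
def pvOkIntP (o : Option String) : Bool :=
  match o with
  | none => true
  | some s => (PySem.Int.ofStr? s).isSome
def pvOkDefP (o : Option String) : Bool :=
  match o with
  | none => true
  | some s => s == "" || (PySem.Int.ofStr? s).isSome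
-- Pre_ excludes events on which A raises (missing "event_type" → KeyError; a non-integer
-- "excellent"/"poor"/"defects" value → ValueError) and production events missing "seller",
-- where A returns a dict keyed by None — a key outside the declared str key type.
def Pre_production_outcome (events : List (List (String × String))) : Prop :=
  (events.all (fun e =>
    (pvGetA e "event_type").isSome &&
    (!(pvIsProdA e) ||
      ((pvGetA e "seller").isSome && pvOkIntP (pvGetA e "excellent") &&
        pvOkIntP (pvGetA e "poor") && pvOkDefP (pvGetA e "defects"))))) = true
instance (events : List (List (String × String))) : Decidable (Pre_production_outcome events) := by
  unfold Pre_production_outcome; infer_instance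
def pvWitness_production_outcome : (List (List (String × String))) :=
  [[("event_type", "production"), ("seller", "a"), ("excellent", "2"), ("poor", "5"), ("defects", "1")],
   [("event_type", "sale"), ("seller", "b")],
   [("event_type", "production"), ("seller", "a"), ("poor", "3")]]
def Spec_production_outcome (events : List (List (String × String))) (out : List (String × List (String × Int))) : Prop := out = production_outcome_alt events
instance (events : List (List (String × String))) (out : List (String × List (String × Int))) : Decidable (Spec_production_outcome events out) := by unfold Spec_production_outcome; infer_instance

-- ===== CLAIM (what is proved, stated in full; the proofs are below) =====
def Claim_equal_production_outcome : Prop := ∀ (events : List (List (String × String))), Dom_production_outcome events → Pre_production_outcome events → Spec_production_outcome events (production_outcome events)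

-- ===== LEMMAS AND PROOFS =====

-- the loop bodies with the `if event_type == production` test factored out (proof helpers)
def pvStepA' (d : PySem.Dict String (PySem.Dict String Int)) (e : List (String × String)) :
    PySem.Dict String (PySem.Dict String Int) :=
  (d.setdefault (pvSellerA e) pvInitA).modify (pvSellerA e) pvInitA (pvUpdA e)

def pvStepB' (g : PySem.Dict String (List (List (String × String))))
    (e : List (String × String)) : PySem.Dict String (List (List (String × String))) :=
  g.modify (pvSellerA e) [] (· ++ [e])

def pvMk4 (a b c d : Int) : PySem.Dict String Int :=
  PySem.Dict.mk [("events", a), ("excellent", b), ("poor_planned", c), ("defects", d)]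

theorem pvFoldA_filter (l : List (List (String × String)))
    (d : PySem.Dict String (PySem.Dict String Int)) :
    l.foldl pvStepA d = (l.filter pvIsProdA).foldl pvStepA' d := by
  have h : pvStepA = fun x y => if pvIsProdA y then pvStepA' x y else x := by
    funext x y; simp [pvStepA, pvStepA']
  rw [h, List.foldl_filter]

theorem pvFoldB_filter (l : List (List (String × String)))
    (g : PySem.Dict String (List (List (String × String)))) :
    l.foldl pvStepB g = (l.filter pvIsProdA).foldl pvStepB' g := by
  have h : pvStepB = fun x y => if pvIsProdA y then pvStepB' x y else x := by
    funext x y; simp [pvStepB, pvStepB']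
  rw [h, List.foldl_filter]

theorem pvKeys_stepA' (d : PySem.Dict String (PySem.Dict String Int))
    (e : List (String × String)) :
    (pvStepA' d e).keys =
      if d.contains (pvSellerA e) then d.keys else d.keys ++ [pvSellerA e] := by
  rw [pvStepA', PySem.Dict.keys_modify,
    PySem.Dict.keys_insert_of_contains _ _
      (by simp [PySem.Dict.contains_setdefault]),
    PySem.Dict.keys_setdefault]

theorem pvKeys_stepB' (g : PySem.Dict String (List (List (String × String))))
    (e : List (String × String)) :
    (pvStepB' g e).keys =
      if g.contains (pvSellerA e) then g.keys else g.keys ++ [pvSellerA e] := by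
  rw [pvStepB', PySem.Dict.keys_modify]
  by_cases h : g.contains (pvSellerA e)
  · rw [PySem.Dict.keys_insert_of_contains _ _ h, if_pos h]
  · rw [PySem.Dict.keys_insert_of_not_contains _ _ (by simpa using h),
      if_neg h]

theorem pvKeysAB (l : List (List (String × String)))
    (d : PySem.Dict String (PySem.Dict String Int))
    (g : PySem.Dict String (List (List (String × String))))
    (h : d.keys = g.keys) :
    (l.foldl pvStepA' d).keys = (l.foldl pvStepB' g).keys := by
  induction l generalizing d g with
  | nil => simpa using h
  | cons e l ih =>
    simp only [List.foldl_cons]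
    apply ih
    have hc : d.contains (pvSellerA e) = g.contains (pvSellerA e) := by
      rw [PySem.Dict.contains_eq_decide_mem_keys, PySem.Dict.contains_eq_decide_mem_keys, h]
    rw [pvKeys_stepA', pvKeys_stepB', hc, h]

theorem pvNodupA (l : List (List (String × String)))
    (d : PySem.Dict String (PySem.Dict String Int)) (h : d.keys.Nodup) :
    (l.foldl pvStepA' d).keys.Nodup := by
  induction l generalizing d with
  | nil => simpa using h
  | cons e l ih =>
    simp only [List.foldl_cons]
    apply ih
    rw [pvKeys_stepA']
    by_cases hc : d.contains (pvSellerA e)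
    · simpa [hc] using h
    · have hm : pvSellerA e ∉ d.keys := by
        have hcc := PySem.Dict.contains_eq_decide_mem_keys d (pvSellerA e)
        rw [Bool.not_eq_true] at hc
        rw [hc] at hcc
        simpa using hcc.symm
      rw [if_neg (by simpa using hc), List.nodup_append]
      refine ⟨h, List.nodup_singleton _, ?_⟩
      intro a ha b hb
      rw [List.mem_singleton] at hb
      subst hb
      exact fun hEq => hm (hEq ▸ ha)

theorem pvGetDA (l : List (List (String × String)))
    (d : PySem.Dict String (PySem.Dict String Int)) (t : String) :
    (l.foldl pvStepA' d).getD t pvInitA =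
      (l.filter (fun e => pvSellerA e == t)).foldl (fun v e => pvUpdA e v)
        (d.getD t pvInitA) := by
  induction l generalizing d with
  | nil => rfl
  | cons e l ih =>
    simp only [List.foldl_cons, List.filter_cons]
    by_cases h : pvSellerA e = t
    · subst h
      rw [ih]
      simp only [beq_self_eq_true, if_pos, List.foldl_cons]
      congr 1
      rw [pvStepA', PySem.Dict.getD_modify_self, PySem.Dict.getD_setdefault_self]
    · have hne : (pvSellerA e == t) = false := by simpa using h
      rw [ih]
      simp only [hne, Bool.false_eq_true, if_neg, not_false_eq_true]
      congr 1
      rw [pvStepA', PySem.Dict.getD_modify_of_ne _ _ _ (Ne.symm h),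
        PySem.Dict.getD_eq_get?_getD,
        PySem.Dict.get?_setdefault_of_ne _ _ (Ne.symm h),
        PySem.Dict.getD_eq_get?_getD]

theorem pvGetDB (l : List (List (String × String)))
    (g : PySem.Dict String (List (List (String × String)))) (t : String) :
    (l.foldl pvStepB' g).getD t [] =
      g.getD t [] ++ l.filter (fun e => pvSellerA e == t) := by
  induction l generalizing g with
  | nil => simp
  | cons e l ih =>
    simp only [List.foldl_cons, List.filter_cons]
    rw [ih]
    by_cases h : pvSellerA e = t
    · subst h
      simp only [beq_self_eq_true, if_pos]
      rw [pvStepB', PySem.Dict.getD_modify_self, List.append_assoc]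
      rfl
    · have hne : (pvSellerA e == t) = false := by simpa using h
      simp only [hne, Bool.false_eq_true, if_neg, not_false_eq_true]
      rw [pvStepB', PySem.Dict.getD_modify_of_ne _ _ _ (Ne.symm h)]

theorem pvUpdA_mk4 (e : List (String × String)) (a b c d : Int) :
    pvUpdA e (pvMk4 a b c d) =
      pvMk4 (a + 1) (b + pvIntA (pvGetA e "excellent"))
        (c + max 0 (pvIntA (pvGetA e "poor") - pvIntA (pvGetA e "defects")))
        (d + pvIntA (pvGetA e "defects")) := by
  simp [pvUpdA, pvMk4, PySem.Dict.modify, PySem.Dict.insert, PySem.Dict.getD,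
    PySem.Dict.get?, PySem.Dict.contains, List.find?, List.any]

theorem pvInnerAB (l : List (List (String × String))) (a b c d : Int) :
    (l.foldl (fun v e => pvUpdA e v) (pvMk4 a b c d)).items =
      [("events", (l.foldl pvTupStepB (a, b, c, d)).1),
       ("excellent", (l.foldl pvTupStepB (a, b, c, d)).2.1),
       ("poor_planned", (l.foldl pvTupStepB (a, b, c, d)).2.2.1),
       ("defects", (l.foldl pvTupStepB (a, b, c, d)).2.2.2)] := by
  induction l generalizing a b c d with
  | nil => rfl
  | cons e l ih =>
    simp only [List.foldl_cons, pvUpdA_mk4]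
    rw [ih]
    rfl

theorem pvInit_eq_mk4 : pvInitA = pvMk4 0 0 0 0 := rfl

-- ===== VERDICT (by name: the statement is the Claim_ definition above) =====
theorem production_outcome_spec : Claim_equal_production_outcome := by
  intro events _ _
  unfold Spec_production_outcome production_outcome production_outcome_alt
  rw [pvFoldA_filter, pvFoldB_filter]
  set fl := events.filter pvIsProdA with hfl
  have hkeys : (fl.foldl pvStepA' PySem.Dict.empty).keys =
      (fl.foldl pvStepB' PySem.Dict.empty).keys := by
    apply pvKeysAB
    simp [PySem.Dict.keys_empty]
  have hndA : (fl.foldl pvStepA' PySem.Dict.empty).keys.Nodup :=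
    pvNodupA _ _ (by simp [PySem.Dict.keys_empty])
  have hndB : (fl.foldl pvStepB' PySem.Dict.empty).keys.Nodup := by
    rw [← hkeys]; exact hndA
  rw [PySem.Dict.items_eq_map_keys _ hndA pvInitA,
    PySem.Dict.items_eq_map_keys _ hndB []]
  rw [← hkeys, List.map_map, List.map_map]
  apply List.map_congr_left
  intro k _
  simp only [Function.comp]
  refine congrArg (fun z => (k, z)) ?_
  rw [pvGetDA, pvGetDB, PySem.Dict.getD_empty, PySem.Dict.getD_empty,
    List.nil_append, pvInit_eq_mk4, pvInnerAB]
  rfl
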